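-- pv_equiv track=rewrite | github.com/miliar/Code_Jam_Webscraper | solutions_python/Problem_58/33.py | proc_testcase
-- ===== SOURCE A (Python) =====
-- def test_num(a,b):
--     if b > a:
--         t=b
--         b=a
--         a=t
--     f = True
--     count = 0
--     while a > b:
--         if a >= 2*b:
--             #print count,a,b,f
--             return f
--         t=b
--         b=a-b
--         a=t
--         f = not f
--         count +=1
--     #print count,a,b,f
--     return not f
--
-- def proc_testcase(tc):
--     a1,a2,b1,b2=tc
--     s=0
--     for i in range(a1,a2+1):
--        for j in range(b1,b2+1):
--            if test_num(i,j):
--                s+=1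
--     return str(s)
-- ===== SOURCE B (Python) =====
-- def _wins(i, j):
--     M, m = (i, j) if i >= j else (j, i)
--     if M == m:
--         return False
--     if m <= 0:
--         return True
--     return M * M >= M * m + m * m
--
-- def proc_testcase(tc):
--     a1, a2, b1, b2 = tc
--     return str(sum(1 for i in range(a1, a2 + 1)
--                      for j in range(b1, b2 + 1) if _wins(i, j)))
-- ===== Notes on version B (the rewrite author's own statement) =====
-- stated objective: simpler
-- what changed: The per-pair subtractive Euclid-game loop is replaced by the closed-form golden-ratio test M*M >= M*m + m*m (with the degenerate tie and nonpositive cases decided directly), so each pair is judged by one integer inequality instead of an iterated subtraction loop.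
import Mathlib
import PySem

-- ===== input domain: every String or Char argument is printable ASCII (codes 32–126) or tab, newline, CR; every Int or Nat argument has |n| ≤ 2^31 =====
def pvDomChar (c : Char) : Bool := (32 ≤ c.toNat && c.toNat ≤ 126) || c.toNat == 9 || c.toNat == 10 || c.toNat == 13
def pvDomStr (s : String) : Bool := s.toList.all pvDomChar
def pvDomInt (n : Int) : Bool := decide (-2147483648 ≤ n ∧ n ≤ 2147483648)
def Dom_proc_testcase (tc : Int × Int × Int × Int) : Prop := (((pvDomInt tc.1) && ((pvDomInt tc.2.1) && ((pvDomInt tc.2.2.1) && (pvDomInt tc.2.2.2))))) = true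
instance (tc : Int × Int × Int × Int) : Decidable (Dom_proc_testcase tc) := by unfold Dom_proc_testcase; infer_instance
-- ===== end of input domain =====

-- B replaces A's per-pair subtractive Euclid-game loop by the closed-form test
-- max²≥max·min+min² (simpler: one integer inequality per pair instead of a loop).

-- ===== PORT A =====
-- the while-loop of test_num after the swap; f is the parity flag
def testNumLoop (a b : Int) (f : Bool) : Bool :=
  if a > b then
    if a ≥ 2 * b then f
    else testNumLoop b (a - b) (!f)
  else !f
termination_by a.toNat
decreasing_by omega

def test_num (a b : Int) : Bool :=
  if b > a then testNumLoop b a true else testNumLoop a b true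

def proc_testcase (tc : Int × Int × Int × Int) : String :=
  let s : Int :=
    (PySem.List.pyRange tc.1 (tc.2.1 + 1) 1).foldl
      (fun s i =>
        (PySem.List.pyRange tc.2.2.1 (tc.2.2.2 + 1) 1).foldl
          (fun s j => if test_num i j then s + 1 else s) s) 0
  PySem.Int.toStr s

-- ===== PORT B =====
def pvWins (i j : Int) : Bool :=
  let M := if i ≥ j then i else j
  let m := if i ≥ j then j else i
  if M = m then false
  else if m ≤ 0 then true
  else decide (M * M ≥ M * m + m * m)

def proc_testcase_alt (tc : Int × Int × Int × Int) : String :=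
  PySem.Int.toStr
    (((PySem.List.pyRange tc.1 (tc.2.1 + 1) 1).flatMap
        (fun i => (PySem.List.pyRange tc.2.2.1 (tc.2.2.2 + 1) 1).filter
          (fun j => pvWins i j))).length : Int)

-- ===== PRECONDITION & SPEC =====
def Spec_proc_testcase (tc : Int × Int × Int × Int) (out : String) : Prop := out = proc_testcase_alt tc
instance (tc : Int × Int × Int × Int) (out : String) : Decidable (Spec_proc_testcase tc out) := by unfold Spec_proc_testcase; infer_instance

-- ===== CLAIM (what is proved, stated in full; the proofs are below) =====
def Claim_equal_proc_testcase : Prop := ∀ (tc : Int × Int × Int × Int), Dom_proc_testcase tc → Spec_proc_testcase tc (proc_testcase tc)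

-- ===== LEMMAS AND PROOFS =====

-- no positive integer pair sits exactly on the golden ratio
theorem no_phi (a b : Int) (hb : 1 ≤ b) (hab : b < a) : a * a ≠ a * b + b * b := by
  intro h
  have h2b : a < 2 * b := by nlinarith
  have : b * b ≠ b * (a - b) + (a - b) * (a - b) := no_phi b (a - b) (by omega) (by omega)
  apply this; ring_nf; nlinarith
termination_by a.toNat
decreasing_by omega

theorem loop_char (a b : Int) (f : Bool) (hb : 1 ≤ b) (hab : b < a) :
    testNumLoop a b f = (if a * a ≥ a * b + b * b then f else !f) := by
  rw [testNumLoop]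
  by_cases h2 : a ≥ 2 * b
  · have : a * a ≥ a * b + b * b := by nlinarith
    simp [hab, h2, this]
  · have hlt : a < 2 * b := by omega
    rw [if_pos hab, if_neg h2, loop_char b (a - b) (!f) (by omega) (by omega)]
    have hne := no_phi a b hb hab
    have key : (b * b ≥ b * (a - b) + (a - b) * (a - b)) ↔ ¬ (a * a ≥ a * b + b * b) := by
      constructor
      · intro hk hw
        have h1 : a * a ≤ a * b + b * b := by nlinarith
        exact hne (le_antisymm h1 hw)
      · intro hnw
        nlinarith [lt_of_not_ge hnw]
    by_cases hw : a * a ≥ a * b + b * b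
    · simp [hw, (not_iff_not.mpr key).mpr (by simpa using hw)]
    · simp [hw, key.mpr hw]
termination_by a.toNat
decreasing_by omega

theorem test_num_eq_wins (i j : Int) : test_num i j = pvWins i j := by
  unfold test_num pvWins
  by_cases hij : i ≥ j
  · simp only [if_pos hij]
    have hnswap : ¬ j > i := by omega
    rw [if_neg hnswap]
    by_cases heq : i = j
    · subst heq
      rw [testNumLoop]
      simp
    · have hlt : j < i := by omega
      rw [if_neg heq]
      by_cases hm : j ≤ 0
      · rw [testNumLoop, if_pos hlt, if_pos (by omega)]
        simp [hm]
      · rw [loop_char i j true (by omega) hlt]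
        simp [hm]
  · have hswap : j > i := by omega
    simp only [if_neg hij, if_pos hswap]
    by_cases heq : j = i
    · omega
    · have hlt : i < j := by omega
      rw [if_neg heq]
      by_cases hm : i ≤ 0
      · rw [testNumLoop, if_pos hlt, if_pos (by omega)]
        simp [hm]
      · rw [loop_char j i true (by omega) hlt]
        simp [hm]

theorem count_fold (p : Int → Bool) (l : List Int) (s : Int) :
    l.foldl (fun s j => if p j then s + 1 else s) s = s + (l.filter p).length := by
  induction l generalizing s with
  | nil => simp
  | cons x xs ih =>
    by_cases h : p x
    · simp [List.foldl, h, ih]; omega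
    · simp [List.foldl, h, ih]

theorem outer_fold (pr : List Int) (inner : List Int) (p : Int → Int → Bool) (s : Int) :
    pr.foldl (fun s i => inner.foldl (fun s j => if p i j then s + 1 else s) s) s
      = s + ((pr.flatMap (fun i => inner.filter (p i))).length : Int) := by
  induction pr generalizing s with
  | nil => simp
  | cons x xs ih =>
    simp only [List.foldl, List.flatMap_cons, List.length_append]
    rw [count_fold, ih]
    push_cast; ring

-- ===== VERDICT (by name: the statement is the Claim_ definition above) =====
theorem proc_testcase_spec : Claim_equal_proc_testcase := by
  intro tc _
  unfold Spec_proc_testcase proc_testcase proc_testcase_alt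
  simp only [test_num_eq_wins]
  rw [outer_fold]
  simp
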